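-- pv_equiv track=rewrite | github.com/DylanG5/sanskrit-cipher | src/ml_pipeline/processors/edge_detection_processor.py | _classify_piece_type
-- ===== SOURCE A (Python) =====
-- from typing import Any, Dict, List, Optional, Sequence, Tuple
--
-- def _classify_piece_type(border_edges: List[str]) -> str:
--     borders = set(border_edges)
--     if len(borders) == 0:
--         return "interior"
--     if len(borders) == 1:
--         return "edge"
--
--     adj = {
--         frozenset(("top_edge", "left_edge")),
--         frozenset(("top_edge", "right_edge")),
--         frozenset(("bottom_edge", "left_edge")),
--         frozenset(("bottom_edge", "right_edge")),
--     }
--     if any(frozenset(pair) <= borders for pair in adj):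
--         return "corner"
--     return "edge"
-- ===== SOURCE B (Python) =====
-- def _classify_piece_type(border_edges):
--     borders = set(border_edges)
--     if not borders:
--         return "interior"
--     horizontal = borders & {"top_edge", "bottom_edge"}
--     vertical = borders & {"left_edge", "right_edge"}
--     return "corner" if horizontal and vertical else "edge"
-- ===== Notes on version B (the rewrite author's own statement) =====
-- stated objective: simpler
-- what changed: Replaces the len==1 special case and the scan over four frozenset adjacency pairs with two direct axis intersections (horizontal, vertical); corner iff both are non-empty.
import Mathlib
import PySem

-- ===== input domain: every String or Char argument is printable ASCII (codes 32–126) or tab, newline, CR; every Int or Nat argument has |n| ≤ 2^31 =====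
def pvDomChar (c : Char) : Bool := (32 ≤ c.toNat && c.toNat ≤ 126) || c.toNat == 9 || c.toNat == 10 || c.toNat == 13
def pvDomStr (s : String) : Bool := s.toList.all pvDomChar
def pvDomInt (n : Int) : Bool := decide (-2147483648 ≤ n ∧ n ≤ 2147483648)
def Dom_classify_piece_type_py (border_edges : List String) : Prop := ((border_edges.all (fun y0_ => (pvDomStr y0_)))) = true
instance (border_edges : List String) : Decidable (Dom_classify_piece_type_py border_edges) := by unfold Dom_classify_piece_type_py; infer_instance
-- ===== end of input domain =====

-- B replaces A's len==1 special case and scan over four adjacency pairs by two axis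
-- intersections (horizontal/vertical), returning "corner" iff both are non-empty (simpler).

-- ===== PORT A =====
def classify_piece_type_py (border_edges : List String) : String :=
  let borders : PySem.Set String := PySem.Set.ofList border_edges
  if PySem.Set.len borders = 0 then "interior"
  else if PySem.Set.len borders = 1 then "edge"
  else
    -- adj is a set of frozensets iterated only through any(); the subset test
    -- 'frozenset(pair) <= borders' is ported as membership of both pair elements
    let adj : List (List String) :=
      [["top_edge", "left_edge"], ["top_edge", "right_edge"],
       ["bottom_edge", "left_edge"], ["bottom_edge", "right_edge"]]
    if adj.any (fun pair => pair.all (fun x => PySem.Set.contains borders x)) then "corner"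
    else "edge"

-- ===== PORT B =====
def classify_piece_type_py_alt (border_edges : List String) : String :=
  let borders : PySem.Set String := PySem.Set.ofList border_edges
  if borders.isEmpty then "interior"
  else
    let horizontal := PySem.Set.inter borders ["top_edge", "bottom_edge"]
    let vertical := PySem.Set.inter borders ["left_edge", "right_edge"]
    if !horizontal.isEmpty && !vertical.isEmpty then "corner" else "edge"

-- ===== PRECONDITION & SPEC =====
def Spec_classify_piece_type_py (border_edges : List String) (out : String) : Prop := out = classify_piece_type_py_alt border_edges
instance (border_edges : List String) (out : String) : Decidable (Spec_classify_piece_type_py border_edges out) := by unfold Spec_classify_piece_type_py; infer_instance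

-- ===== CLAIM (what is proved, stated in full; the proofs are below) =====
def Claim_equal_classify_piece_type_py : Prop := ∀ (border_edges : List String), Dom_classify_piece_type_py border_edges → Spec_classify_piece_type_py border_edges (classify_piece_type_py border_edges)

-- ===== LEMMAS AND PROOFS =====

-- Both branch structures, compared over an arbitrary list standing for set(border_edges).
theorem pv_body_eq (s : List String) :
    (if PySem.Set.len s = 0 then "interior"
     else if PySem.Set.len s = 1 then "edge"
     else
       if [["top_edge", "left_edge"], ["top_edge", "right_edge"],
           ["bottom_edge", "left_edge"], ["bottom_edge", "right_edge"]].any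
            (fun pair => pair.all (fun x => PySem.Set.contains s x)) then "corner"
       else "edge") =
    (if s.isEmpty then "interior"
     else
       if !(PySem.Set.inter s ["top_edge", "bottom_edge"]).isEmpty &&
          !(PySem.Set.inter s ["left_edge", "right_edge"]).isEmpty then "corner"
       else "edge") := by
  have hH : ((PySem.Set.inter s ["top_edge", "bottom_edge"] : List String) = []) ↔
      ¬("top_edge" ∈ s ∨ "bottom_edge" ∈ s) := by
    rw [List.eq_nil_iff_forall_not_mem]
    constructor
    · intro h
      rintro (h' | h')
      · exact h _ ((PySem.Set.mem_inter _ _ _).mpr ⟨h', by simp⟩)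
      · exact h _ ((PySem.Set.mem_inter _ _ _).mpr ⟨h', by simp⟩)
    · intro h x hx
      rcases (PySem.Set.mem_inter _ _ _).mp hx with ⟨hxs, hxt⟩
      simp only [List.mem_cons, List.not_mem_nil, or_false] at hxt
      rcases hxt with rfl | rfl
      · exact h (Or.inl hxs)
      · exact h (Or.inr hxs)
  have hV : ((PySem.Set.inter s ["left_edge", "right_edge"] : List String) = []) ↔
      ¬("left_edge" ∈ s ∨ "right_edge" ∈ s) := by
    rw [List.eq_nil_iff_forall_not_mem]
    constructor
    · intro h
      rintro (h' | h')
      · exact h _ ((PySem.Set.mem_inter _ _ _).mpr ⟨h', by simp⟩)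
      · exact h _ ((PySem.Set.mem_inter _ _ _).mpr ⟨h', by simp⟩)
    · intro h x hx
      rcases (PySem.Set.mem_inter _ _ _).mp hx with ⟨hxs, hxt⟩
      simp only [List.mem_cons, List.not_mem_nil, or_false] at hxt
      rcases hxt with rfl | rfl
      · exact h (Or.inl hxs)
      · exact h (Or.inr hxs)
  have hA : ([["top_edge", "left_edge"], ["top_edge", "right_edge"],
       ["bottom_edge", "left_edge"], ["bottom_edge", "right_edge"]].any
        (fun pair => pair.all (fun x => PySem.Set.contains s x)) = true) ↔
      (("top_edge" ∈ s ∨ "bottom_edge" ∈ s) ∧ ("left_edge" ∈ s ∨ "right_edge" ∈ s)) := by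
    simp
    tauto
  have hd2 : ((!(PySem.Set.inter s ["top_edge", "bottom_edge"] : List String).isEmpty &&
      !(PySem.Set.inter s ["left_edge", "right_edge"] : List String).isEmpty) = true) ↔
      (("top_edge" ∈ s ∨ "bottom_edge" ∈ s) ∧ ("left_edge" ∈ s ∨ "right_edge" ∈ s)) := by
    simp only [Bool.and_eq_true, Bool.not_eq_true', List.isEmpty_eq_false_iff, ne_eq, hH, hV]
    tauto
  have h1imp : s.length = 1 →
      ¬(("top_edge" ∈ s ∨ "bottom_edge" ∈ s) ∧ ("left_edge" ∈ s ∨ "right_edge" ∈ s)) := by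
    intro h1 ⟨hh, hv⟩
    obtain ⟨a, ha⟩ := List.length_eq_one_iff.mp h1
    rw [ha] at hh hv
    simp only [List.mem_singleton] at hh hv
    rcases hh with rfl | rfl <;> rcases hv with h' | h' <;> simp_all
  have hlen0 : (PySem.Set.len s = 0) ↔ s = [] := by
    simp [PySem.Set.len, List.length_eq_zero_iff]
  have hlen1 : (PySem.Set.len s = 1) ↔ s.length = 1 := by
    simp [PySem.Set.len]
  clear hH hV
  split_ifs with g1 g2 g3 g4 g5 g6 g7 <;> try rfl
  all_goals exfalso
  all_goals simp only [hlen0, hlen1, List.isEmpty_iff, hd2, hA] at *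
  all_goals tauto

theorem pv_ports_eq (l : List String) :
    classify_piece_type_py l = classify_piece_type_py_alt l :=
  pv_body_eq (PySem.Set.ofList l)

-- ===== VERDICT (by name: the statement is the Claim_ definition above) =====
theorem classify_piece_type_py_spec : Claim_equal_classify_piece_type_py := by
  intro border_edges _
  exact pv_ports_eq border_edges
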